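-- pv_equiv track=rewrite | github.com/Pichardescu/yang-mills-s3-computations | yang_mills_s3/rg/polymer_algebra_ym.py | _disjoint_decompositions
-- ===== SOURCE A (Python) =====
-- from typing import Optional, Dict, List, Tuple, Set, Any, Callable
-- from itertools import combinations
--
-- def _disjoint_decompositions(block_ids: frozenset
--                              ) -> List[Tuple[frozenset, frozenset]]:
--     """
--     Enumerate all disjoint decompositions X = X1 u X2 with
--     X1, X2 both non-empty.
--
--     For a polymer of size s, there are 2^s - 2 such decompositions
--     (all subsets except empty and full set, paired with complement).
--
--     Parameters
--     ----------
--     block_ids : frozenset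
--         Blocks in the polymer X.
--
--     Returns
--     -------
--     list of (frozenset, frozenset) : decompositions (X1, X2)
--     """
--     blocks = sorted(block_ids)
--     n = len(blocks)
--     decomps = []
--     # Enumerate all non-trivial subsets (avoid double counting:
--     # only take subsets of size <= n/2, plus size n/2 with
--     # canonical ordering to break symmetry)
--     for size in range(1, n):
--         for combo in combinations(blocks, size):
--             X1 = frozenset(combo)
--             X2 = block_ids - X1
--             if len(X2) > 0:
--                 # Canonical: only yield (X1, X2) once
--                 if min(X1) <= min(X2):
--                     decomps.append((X1, X2))
--     return decomps
-- ===== SOURCE B (Python) =====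
-- from itertools import combinations
--
-- def _disjoint_decompositions(block_ids):
--     # Canonical decompositions are exactly those whose X1 contains the global
--     # minimum block: fix it into X1 and enumerate only subsets of the rest.
--     blocks = sorted(block_ids)
--     if not blocks:
--         return []
--     first, rest = blocks[0], blocks[1:]
--     decomps = []
--     for size in range(1, len(blocks)):
--         for tail in combinations(rest, size - 1):
--             X1 = frozenset((first,) + tail)
--             decomps.append((X1, block_ids - X1))
--     return decomps
-- ===== Notes on version B (the rewrite author's own statement) =====
-- stated objective: alternative
-- what changed: Instead of enumerating all 2^n subsets and filtering by a min(X1) <= min(X2) comparison, B fixes the global minimum block into X1 and enumerates only combinations of the remaining blocks, generating exactly the canonical half directly with no filter and no min scans.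
import Mathlib
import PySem

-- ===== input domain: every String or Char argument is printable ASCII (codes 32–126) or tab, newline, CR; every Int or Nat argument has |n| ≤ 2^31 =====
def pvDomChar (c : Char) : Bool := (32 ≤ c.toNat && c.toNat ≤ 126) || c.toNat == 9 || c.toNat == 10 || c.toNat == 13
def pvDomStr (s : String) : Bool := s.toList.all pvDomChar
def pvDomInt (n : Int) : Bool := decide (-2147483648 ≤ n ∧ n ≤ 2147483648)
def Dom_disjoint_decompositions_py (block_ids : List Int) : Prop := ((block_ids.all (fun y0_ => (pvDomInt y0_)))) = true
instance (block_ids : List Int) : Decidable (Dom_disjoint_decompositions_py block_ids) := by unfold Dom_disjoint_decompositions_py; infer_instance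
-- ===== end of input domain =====

-- B replaces A's enumerate-all-subsets-and-filter-by-min loop with a direct enumeration
-- of the canonical subsets containing the minimum block (no filter, no min scans).

-- itertools.combinations(xs, k) in lexicographic index order (exact)
def pvCombos (k : Nat) (xs : List Int) : List (List Int) :=
  match k, xs with
  | 0, _ => [[]]
  | _ + 1, [] => []
  | k + 1, x :: rest => (pvCombos k rest).map (fun c => x :: c) ++ pvCombos (k + 1) rest

-- Python min(s) on a NON-EMPTY collection (exact there; A only applies it to non-empty sets)
def pvMin (xs : List Int) : Int :=
  match xs with
  | [] => 0
  | x :: t => t.foldl min x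

-- ===== PORT A =====
-- block_ids is a Python frozenset: the list holds its distinct elements (PySem.Set).
def disjoint_decompositions_py (block_ids : List Int) : List (List Int × List Int) :=
  let blocks := PySem.List.sorted (PySem.Set.ofList block_ids) (fun x => x) false
  let n : Int := blocks.length
  (PySem.List.pyRange 1 n 1).foldl (fun decomps size =>
    (pvCombos size.toNat blocks).foldl (fun decomps combo =>
      let X1 := combo  -- frozenset(combo): combo is already distinct
      let X2 := PySem.Set.diff (PySem.Set.ofList block_ids) X1
      if X2.length > 0 then
        if pvMin X1 ≤ pvMin X2 then decomps ++ [(X1, X2)] else decomps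
      else decomps) decomps) []

-- ===== PORT B =====
def disjoint_decompositions_py_alt (block_ids : List Int) : List (List Int × List Int) :=
  match PySem.List.sorted (PySem.Set.ofList block_ids) (fun x => x) false with
  | [] => []
  | first :: rest =>
    (PySem.List.pyRange 1 ((rest.length : Int) + 1) 1).foldl (fun decomps size =>
      (pvCombos (size.toNat - 1) rest).foldl (fun decomps tail =>
        let X1 := first :: tail  -- frozenset((first,) + tail)
        decomps ++ [(X1, PySem.Set.diff (PySem.Set.ofList block_ids) X1)]) decomps) []

-- ===== PRECONDITION & SPEC =====
def Spec_disjoint_decompositions_py (block_ids : List Int) (out : List (List Int × List Int)) : Prop := out = disjoint_decompositions_py_alt block_ids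
instance (block_ids : List Int) (out : List (List Int × List Int)) : Decidable (Spec_disjoint_decompositions_py block_ids out) := by unfold Spec_disjoint_decompositions_py; infer_instance

-- ===== CLAIM (what is proved, stated in full; the proofs are below) =====
def Claim_equal_disjoint_decompositions_py : Prop := ∀ (block_ids : List Int), Dom_disjoint_decompositions_py block_ids → Spec_disjoint_decompositions_py block_ids (disjoint_decompositions_py block_ids)

-- ===== LEMMAS AND PROOFS =====

theorem pvCombos_mem {c xs : List Int} {k : Nat} (h : c ∈ pvCombos k xs) :
    c.Sublist xs ∧ c.length = k := by
  induction xs generalizing k c with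
  | nil =>
    cases k with
    | zero => simp [pvCombos] at h; simp [h]
    | succ k => simp [pvCombos] at h
  | cons x rest ih =>
    cases k with
    | zero => simp [pvCombos] at h; simp [h]
    | succ k =>
      simp only [pvCombos, List.mem_append, List.mem_map] at h
      rcases h with ⟨c', hc', rfl⟩ | h
      · obtain ⟨hs, hl⟩ := ih hc'
        exact ⟨List.Sublist.cons₂ x hs, by simp [hl]⟩
      · obtain ⟨hs, hl⟩ := ih h
        exact ⟨hs.cons x, hl⟩

theorem foldl_min_eq_self {t : List Int} {a : Int} (h : ∀ x ∈ t, a ≤ x) :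
    t.foldl min a = a := by
  induction t generalizing a with
  | nil => rfl
  | cons x t ih =>
    simp only [List.foldl_cons]
    rw [min_eq_left (h x (by simp))]
    exact ih (fun y hy => h y (by simp [hy]))

theorem pvMin_mem {xs : List Int} (h : xs ≠ []) : pvMin xs ∈ xs := by
  cases xs with
  | nil => exact absurd rfl h
  | cons x t =>
    simp only [pvMin]
    rcases PySem.List.foldl_min_mem t x with h' | h'
    · simp [h']
    · simp [h']

theorem pvMin_le {xs : List Int} {y : Int} (hy : y ∈ xs) : pvMin xs ≤ y := by
  cases xs with
  | nil => simp at hy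
  | cons x t =>
    simp only [pvMin]
    rcases List.mem_cons.mp hy with rfl | hy
    · exact (PySem.List.foldl_min_le t y).1
    · exact (PySem.List.foldl_min_le t x).2 y hy

theorem foldl_congr_of_mem {α β : Type} {l : List β} {f g : α → β → α} {i : α}
    (h : ∀ a, ∀ s ∈ l, f a s = g a s) : l.foldl f i = l.foldl g i := by
  induction l generalizing i with
  | nil => rfl
  | cons x t ih =>
    simp only [List.foldl_cons]
    rw [h i x (by simp)]
    exact ih (fun a s hs => h a s (by simp [hs]))

theorem foldl_skip {α β : Type} {l : List β} {f : α → β → α} {i : α}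
    (h : ∀ (a : α), ∀ s ∈ l, f a s = a) : l.foldl f i = i := by
  induction l generalizing i with
  | nil => rfl
  | cons x t ih =>
    simp only [List.foldl_cons, h i x (by simp)]
    exact ih (fun a s hs => h a s (by simp [hs]))

theorem ports_eq (block_ids : List Int) :
    disjoint_decompositions_py block_ids = disjoint_decompositions_py_alt block_ids := by
  have hpw := PySem.List.sorted_ofList_pairwise_lt (xs := block_ids)
  have hmem : ∀ x : Int, x ∈ PySem.List.sorted (PySem.Set.ofList block_ids) (fun x => x) false ↔
      x ∈ PySem.Set.ofList block_ids := fun x => PySem.List.mem_sorted _ _ _ _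
  unfold disjoint_decompositions_py disjoint_decompositions_py_alt
  generalize hb : PySem.List.sorted (PySem.Set.ofList block_ids) (fun x => x) false = blocks at hpw hmem ⊢
  clear hb
  cases blocks with
  | nil =>
    simp [PySem.List.pyRange_one_eq_nil (by norm_num : (0:Int) ≤ 1)]
  | cons first rest =>
    rw [List.pairwise_cons] at hpw
    obtain ⟨hfr, hpwr⟩ := hpw
    have hnd : rest.Nodup := List.Pairwise.imp (fun h => ne_of_lt h) hpwr
    have hfS : first ∈ PySem.Set.ofList block_ids := (hmem first).mp (by simp)
    have hrS : ∀ y ∈ rest, y ∈ PySem.Set.ofList block_ids :=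
      fun y hy => (hmem y).mp (by simp [hy])
    simp only [List.length_cons, Nat.cast_add, Nat.cast_one]
    apply foldl_congr_of_mem
    intro a s hs
    rw [PySem.List.mem_pyRange_one] at hs
    obtain ⟨hs1, hs2⟩ := hs
    -- s.toNat = k + 1 with k < rest.length
    obtain ⟨k, hk⟩ : ∃ k, s.toNat = k + 1 := by
      refine ⟨s.toNat - 1, ?_⟩
      omega
    have hklt : k < rest.length := by omega
    rw [hk]
    have hsplit : pvCombos (k + 1) (first :: rest)
        = (pvCombos k rest).map (fun c => first :: c) ++ pvCombos (k + 1) rest := rfl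
    rw [hsplit, List.foldl_append]
    -- the combos not containing `first` are all skipped
    rw [foldl_skip ?hskip]
    case hskip =>
      intro d combo hc
      obtain ⟨hsub, hlc⟩ := pvCombos_mem hc
      have hcr : ∀ y ∈ combo, y ∈ rest := fun y hy => hsub.subset hy
      have hcne : combo ≠ [] := by
        intro h; rw [h] at hlc; simp at hlc
      by_cases h2 : (PySem.Set.diff (PySem.Set.ofList block_ids) combo).length > 0
      · have hminc : first < pvMin combo := hfr _ (hcr _ (pvMin_mem hcne))
        have hfX2 : first ∈ PySem.Set.diff (PySem.Set.ofList block_ids) combo := by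
          rw [PySem.Set.mem_diff]
          exact ⟨hfS, fun hmemc => absurd (hfr first (hcr first hmemc)) (lt_irrefl first)⟩
        have : ¬ (pvMin combo ≤ pvMin (PySem.Set.diff (PySem.Set.ofList block_ids) combo)) := by
          have := pvMin_le hfX2
          omega
        simp [h2, this]
      · simp [h2]
    -- the combos containing `first` are all kept, and match B's
    rw [List.foldl_map]
    apply foldl_congr_of_mem
    intro d tail ht
    obtain ⟨hsub, hlt⟩ := pvCombos_mem ht
    have htr : ∀ y ∈ tail, y ∈ rest := fun y hy => hsub.subset hy
    -- X2 is non-empty: some element of rest is missing from first :: tail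
    obtain ⟨y, hyr, hynotin⟩ : ∃ y ∈ rest, y ∉ first :: tail := by
      by_contra hcon
      push Not at hcon
      have hsubr : rest ⊆ tail := by
        intro y hy
        rcases List.mem_cons.mp (hcon y hy) with rfl | h
        · exact absurd (hfr y hy) (lt_irrefl y)
        · exact h
      have := (List.subperm_of_subset hnd hsubr).length_le
      omega
    have hyX2 : y ∈ PySem.Set.diff (PySem.Set.ofList block_ids) (first :: tail) := by
      rw [PySem.Set.mem_diff]
      exact ⟨hrS y hyr, hynotin⟩
    have h2 : (PySem.Set.diff (PySem.Set.ofList block_ids) (first :: tail)).length > 0 :=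
      List.length_pos_of_mem hyX2
    have hmin1 : pvMin (first :: tail) = first := by
      show tail.foldl min first = first
      exact foldl_min_eq_self (fun x hx => le_of_lt (hfr x (htr x hx)))
    have hmin2 : first ≤ pvMin (PySem.Set.diff (PySem.Set.ofList block_ids) (first :: tail)) := by
      have hne : PySem.Set.diff (PySem.Set.ofList block_ids) (first :: tail) ≠ [] :=
        List.ne_nil_of_mem hyX2
      have hm := pvMin_mem hne
      rw [PySem.Set.mem_diff] at hm
      have : pvMin (PySem.Set.diff (PySem.Set.ofList block_ids) (first :: tail))
          ∈ first :: rest := (hmem _).mpr hm.1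
      rcases List.mem_cons.mp this with h | h
      · omega
      · exact le_of_lt (hfr _ h)
    simp [h2, hmin1, hmin2]

-- ===== VERDICT (by name: the statement is the Claim_ definition above) =====
theorem disjoint_decompositions_py_spec : Claim_equal_disjoint_decompositions_py := by
  intro block_ids _
  unfold Spec_disjoint_decompositions_py
  exact ports_eq block_ids
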